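-- pv_equiv track=rewrite | github.com/sneefyyy/DSL | generators/count_and_transform_generator.py | mark_by_size
-- ===== SOURCE A (Python) =====
-- def mark_by_size(grid):
--     """
--     Replace each shape with a number (1-9) representing its size.
--     """
--     if not grid or not grid[0]:
--         return grid
--
--     rows = len(grid)
--     cols = len(grid[0])
--     visited = [[False] * cols for _ in range(rows)]
--     output = [[0] * cols for _ in range(rows)]
--
--     def dfs(row, col, value, cells):
--         """Find connected component and collect cells."""
--         if (row < 0 or row >= rows or col < 0 or col >= cols or
--             visited[row][col] or grid[row][col] != value or grid[row][col] == 0):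
--             return
--
--         visited[row][col] = True
--         cells.append((row, col))
--
--         # Check 4 neighbors
--         for dr, dc in [(0, 1), (1, 0), (0, -1), (-1, 0)]:
--             dfs(row + dr, col + dc, value, cells)
--
--     # Find all shapes and mark by size
--     for row in range(rows):
--         for col in range(cols):
--             if not visited[row][col] and grid[row][col] != 0:
--                 cells = []
--                 dfs(row, col, grid[row][col], cells)
--
--                 # Mark all cells with the size (capped at 9)
--                 size = min(len(cells), 9)
--                 for r, c in cells:
--                     output[r][c] = size
--
--     return output
-- ===== SOURCE B (Python) =====
-- def mark_by_size(grid):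
--     """
--     Replace each shape with a number (1-9) representing its size.
--     Iterative flood fill with an explicit stack; sizes recorded in a
--     dict and the output grid built in one comprehension at the end.
--     """
--     if not grid or not grid[0]:
--         return grid
--
--     rows = len(grid)
--     cols = len(grid[0])
--     seen = set()
--     size_of = {}
--
--     for r0 in range(rows):
--         for c0 in range(cols):
--             v = grid[r0][c0]
--             if v == 0 or (r0, c0) in seen:
--                 continue
--             comp = []
--             stack = [(r0, c0)]
--             while stack:
--                 r, c = stack.pop()
--                 if ((r, c) in seen or r < 0 or r >= rows or c < 0 or c >= cols
--                         or grid[r][c] != v):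
--                     continue
--                 seen.add((r, c))
--                 comp.append((r, c))
--                 stack.extend([(r - 1, c), (r, c - 1), (r + 1, c), (r, c + 1)])
--             s = min(len(comp), 9)
--             for cell in comp:
--                 size_of[cell] = s
--
--     return [[size_of.get((r, c), 0) for c in range(cols)] for r in range(rows)]
-- ===== Notes on version B (the rewrite author's own statement) =====
-- stated objective: alternative
-- what changed: A's recursive DFS mutating a visited boolean matrix and an output matrix is replaced by an iterative explicit-stack flood fill over a seen-set of coordinate tuples, with component sizes recorded in a dict and the output grid built in a single comprehension at the end.
import Mathlib
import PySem

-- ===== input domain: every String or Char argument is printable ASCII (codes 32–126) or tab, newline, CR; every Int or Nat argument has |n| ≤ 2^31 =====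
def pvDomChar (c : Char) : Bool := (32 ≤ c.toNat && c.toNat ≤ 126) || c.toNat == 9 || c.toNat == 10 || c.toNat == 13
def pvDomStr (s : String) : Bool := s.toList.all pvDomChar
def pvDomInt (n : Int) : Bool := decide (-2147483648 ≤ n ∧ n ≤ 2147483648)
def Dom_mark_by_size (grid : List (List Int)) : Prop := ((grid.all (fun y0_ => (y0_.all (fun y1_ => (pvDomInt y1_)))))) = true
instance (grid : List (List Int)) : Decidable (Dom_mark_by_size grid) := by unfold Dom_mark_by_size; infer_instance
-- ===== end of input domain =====

-- B replaces A's recursive flood fill by an explicit-stack fill over a seen-set, records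
-- component sizes in a dict and builds the output grid in one final comprehension
-- (objective: alternative decomposition, same asymptotic cost).

-- ===== PORT A =====

-- m[r][c] read/write; exact for 0 ≤ r < len(m), 0 ≤ c < len(m[r]) — both programs only
-- index inside these bounds (their bounds guards are checked first).
def pvGetM {α : Type} (m : List (List α)) (d : α) (r c : Int) : α :=
  (m.getD r.toNat []).getD c.toNat d

def pvSetM {α : Type} (m : List (List α)) (r c : Int) (x : α) : List (List α) :=
  m.modify r.toNat (fun row => row.set c.toNat x)

-- the nested 'for row in range(rows): for col in range(cols)' index pairs, row-major
def pvPairs (rows cols : Int) : List (Int × Int) :=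
  (PySem.List.pyRange 0 rows 1).flatMap (fun r => (PySem.List.pyRange 0 cols 1).map (fun c => (r, c)))

-- A's dfs: state = (visited, cells); the fuel only bounds the recursion depth — Python's
-- recursion marks a fresh cell at every level, so depth ≤ rows*cols and the fuel
-- rows*cols+1 passed below never runs out (the proof shows the fuel hypothesis pvU < f
-- always holds on A's calls).
def pvDfs (grid : List (List Int)) (rows cols value : Int) :
    Nat → Int → Int → List (List Bool) × List (Int × Int) →
    List (List Bool) × List (Int × Int)
  | 0, _, _, st => st
  | fuel+1, row, col, (visited, cells) =>
    if row < 0 ∨ rows ≤ row ∨ col < 0 ∨ cols ≤ col ∨ pvGetM visited false row col = true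
        ∨ pvGetM grid 0 row col ≠ value ∨ pvGetM grid 0 row col = 0 then
      (visited, cells)
    else
      let st1 := (pvSetM visited row col true, cells ++ [(row, col)])
      let st2 := pvDfs grid rows cols value fuel row (col+1) st1
      let st3 := pvDfs grid rows cols value fuel (row+1) col st2
      let st4 := pvDfs grid rows cols value fuel row (col-1) st3
      pvDfs grid rows cols value fuel (row-1) col st4

-- one iteration of A's outer double loop: state = (visited, output)
def pvAStep (grid : List (List Int)) (rows cols : Int)
    (st : List (List Bool) × List (List Int)) (rc : Int × Int) :
    List (List Bool) × List (List Int) :=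
  if pvGetM st.1 false rc.1 rc.2 = false ∧ pvGetM grid 0 rc.1 rc.2 ≠ 0 then
    let res := pvDfs grid rows cols (pvGetM grid 0 rc.1 rc.2)
        (rows.toNat * cols.toNat + 1) rc.1 rc.2 (st.1, [])
    let size : Int := min ((res.2.length : Int)) 9
    (res.1, res.2.foldl (fun o p => pvSetM o p.1 p.2 size) st.2)
  else st

def mark_by_size (grid : List (List Int)) : List (List Int) :=
  if grid = [] ∨ grid.headD [] = [] then grid
  else
    let rows : Int := (grid.length : Int)
    let cols : Int := ((grid.headD []).length : Int)
    let visited := List.replicate grid.length (List.replicate (grid.headD []).length false)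
    let output := List.replicate grid.length (List.replicate (grid.headD []).length (0 : Int))
    ((pvPairs rows cols).foldl (pvAStep grid rows cols) (visited, output)).2

-- ===== PORT B =====

-- in-bounds cell (proof-side notion, also used by B's termination measure)
def pvInb (rows cols r c : Int) : Prop := 0 ≤ r ∧ r < rows ∧ 0 ≤ c ∧ c < cols

lemma pvMem_pvPairs {rows cols : Int} {p : Int × Int} :
    p ∈ pvPairs rows cols ↔ pvInb rows cols p.1 p.2 := by
  obtain ⟨r, c⟩ := p
  simp [pvPairs, PySem.List.mem_pyRange_one, pvInb, Prod.ext_iff]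
  aesop

-- termination measure for B's while loop: in-bounds cells not yet in `seen`
def pvUnseen (rows cols : Int) (seen : PySem.Set (Int × Int)) : Nat :=
  ((pvPairs rows cols).filter (fun p => !(PySem.Set.contains seen p))).length

lemma pvUnseen_add_lt (rows cols : Int) (seen : PySem.Set (Int × Int)) (r c : Int)
    (h0 : 0 ≤ r) (h1 : r < rows) (h2 : 0 ≤ c) (h3 : c < cols)
    (hmem : ¬ PySem.Set.contains seen (r, c) = true) :
    pvUnseen rows cols (PySem.Set.add seen (r, c)) < pvUnseen rows cols seen := by
  have hsub : ((pvPairs rows cols).filter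
      (fun p => !(PySem.Set.contains (PySem.Set.add seen (r, c)) p))).Sublist
      ((pvPairs rows cols).filter (fun p => !(PySem.Set.contains seen p))) := by
    apply List.monotone_filter_right
    intro p hp
    simp only [Bool.not_eq_true'] at hp ⊢
    cases hs : PySem.Set.contains seen p with
    | false => rfl
    | true =>
      have : (PySem.Set.add seen (r, c)).contains p = true := by
        rw [PySem.Set.contains_iff, PySem.Set.mem_add]
        exact Or.inl ((PySem.Set.contains_iff seen p).mp hs)
      rw [hp] at this
      exact absurd this (by simp)
  apply Nat.lt_of_le_of_ne (hsub.length_le)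
  intro heq
  have heql := hsub.eq_of_length heq
  have hin : (r, c) ∈ (pvPairs rows cols).filter (fun p => !(PySem.Set.contains seen p)) := by
    rw [List.mem_filter]
    exact ⟨pvMem_pvPairs.mpr ⟨h0, h1, h2, h3⟩, by simpa using hmem⟩
  rw [← heql, List.mem_filter] at hin
  have := hin.2
  simp [PySem.Set.mem_add] at this

-- B's while loop: state = (seen, comp); Python pops from the END of `stack`, so the
-- Lean stack is kept top-first (extend [(r-1,c),(r,c-1),(r+1,c),(r,c+1)] then pop ≡
-- cons (r,c+1),(r+1,c),(r,c-1),(r-1,c) then take the head).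
def pvBLoop (grid : List (List Int)) (rows cols v : Int) :
    PySem.Set (Int × Int) × List (Int × Int) → List (Int × Int) →
    PySem.Set (Int × Int) × List (Int × Int)
  | st, [] => st
  | (seen, comp), (r, c) :: stack =>
    if h : PySem.Set.contains seen (r, c) = true ∨ r < 0 ∨ rows ≤ r ∨ c < 0 ∨ cols ≤ c
        ∨ pvGetM grid 0 r c ≠ v then
      pvBLoop grid rows cols v (seen, comp) stack
    else
      pvBLoop grid rows cols v (PySem.Set.add seen (r, c), comp ++ [(r, c)])
        ((r, c+1) :: (r+1, c) :: (r, c-1) :: (r-1, c) :: stack)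
  termination_by st stack => (pvUnseen rows cols st.1, stack.length)
  decreasing_by
    · exact Prod.Lex.right _ (Nat.lt_succ_self _)
    · exact Prod.Lex.left _ _ (pvUnseen_add_lt rows cols seen r c
        (by omega) (by omega) (by omega) (by omega) (by tauto))

-- one iteration of B's outer double loop: state = (seen, size_of)
def pvBStep (grid : List (List Int)) (rows cols : Int)
    (st : PySem.Set (Int × Int) × PySem.Dict (Int × Int) Int) (rc : Int × Int) :
    PySem.Set (Int × Int) × PySem.Dict (Int × Int) Int :=
  let v := pvGetM grid 0 rc.1 rc.2
  if v = 0 ∨ PySem.Set.contains st.1 rc = true then st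
  else
    let res := pvBLoop grid rows cols v (st.1, []) [rc]
    let s : Int := min ((res.2.length : Int)) 9
    (res.1, res.2.foldl (fun d p => PySem.Dict.insert d p s) st.2)

def mark_by_size_alt (grid : List (List Int)) : List (List Int) :=
  if grid = [] ∨ grid.headD [] = [] then grid
  else
    let rows : Int := (grid.length : Int)
    let cols : Int := ((grid.headD []).length : Int)
    let res := (pvPairs rows cols).foldl (pvBStep grid rows cols)
        (PySem.Set.empty, PySem.Dict.empty)
    (PySem.List.pyRange 0 rows 1).map (fun r =>
      (PySem.List.pyRange 0 cols 1).map (fun c => PySem.Dict.getD res.2 (r, c) 0))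

-- ===== PRECONDITION & SPEC =====
-- Pre_ excludes ragged grids in which some row is shorter than the first row: there both
-- Pythons raise IndexError when they index that row at a column below len(grid[0]).
def Pre_mark_by_size (grid : List (List Int)) : Prop :=
  ∀ row ∈ grid, (grid.headD []).length ≤ row.length
instance (grid : List (List Int)) : Decidable (Pre_mark_by_size grid) := by
  unfold Pre_mark_by_size; infer_instance

def pvWitness_mark_by_size : List (List Int) := [[1, 0], [1, 1]]

def Spec_mark_by_size (grid : List (List Int)) (out : List (List Int)) : Prop := out = mark_by_size_alt grid
instance (grid : List (List Int)) (out : List (List Int)) : Decidable (Spec_mark_by_size grid out) := by unfold Spec_mark_by_size; infer_instance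

-- ===== CLAIM (what is proved, stated in full; the proofs are below) =====
def Claim_equal_mark_by_size : Prop := ∀ (grid : List (List Int)), Dom_mark_by_size grid → Pre_mark_by_size grid → Spec_mark_by_size grid (mark_by_size grid)

-- ===== LEMMAS AND PROOFS =====

-- rows×cols rectangular matrix
def pvShape {α : Type} (rows cols : Int) (m : List (List α)) : Prop :=
  (m.length : Int) = rows ∧ ∀ i : Nat, ∀ _ : i < m.length, ((m[i].length : Int) = cols)

-- A's visited matrix and B's seen set mark the same in-bounds cells
def pvRel (rows cols : Int) (seen : PySem.Set (Int × Int)) (visited : List (List Bool)) : Prop :=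
  ∀ r c, pvInb rows cols r c →
    pvGetM visited false r c = PySem.Set.contains seen (r, c)

-- number of unvisited entries of A's matrix
def pvU (visited : List (List Bool)) : Nat := (visited.map (fun row => row.count false)).sum

lemma pvShape_set {α : Type} {rows cols : Int} {m : List (List α)} {r c : Int} {x : α}
    (hs : pvShape rows cols m) : pvShape rows cols (pvSetM m r c x) := by
  obtain ⟨h1, h2⟩ := hs
  refine ⟨by simpa [pvSetM] using h1, ?_⟩
  intro i hi
  simp only [pvSetM, List.length_modify] at hi ⊢
  rw [List.getElem_modify]
  split <;> simp [h2 i hi]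

lemma pvGetM_set_self {α : Type} {rows cols : Int} {m : List (List α)} {d : α} {r c : Int} {x : α}
    (hs : pvShape rows cols m) (hi : pvInb rows cols r c) :
    pvGetM (pvSetM m r c x) d r c = x := by
  obtain ⟨h1, h2⟩ := hs
  obtain ⟨i0, i1, i2, i3⟩ := hi
  have hr : r.toNat < m.length := by omega
  have hc : c.toNat < m[r.toNat].length := by have := h2 r.toNat hr; omega
  simp only [pvGetM, pvSetM, List.getD_eq_getElem?_getD, List.getElem?_modify,
    List.getElem?_eq_getElem hr]
  simp [hc]

lemma pvGetM_set_ne {α : Type} {rows cols : Int} {m : List (List α)} {d : α} {r c r' c' : Int} {x : α}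
    (hs : pvShape rows cols m) (hi : pvInb rows cols r c) (hi' : pvInb rows cols r' c')
    (hne : (r', c') ≠ (r, c)) :
    pvGetM (pvSetM m r c x) d r' c' = pvGetM m d r' c' := by
  obtain ⟨h1, h2⟩ := hs
  obtain ⟨i0, i1, i2, i3⟩ := hi
  obtain ⟨j0, j1, j2, j3⟩ := hi'
  have hr' : r'.toNat < m.length := by omega
  simp only [pvGetM, pvSetM, List.getD_eq_getElem?_getD, List.getElem?_modify,
    List.getElem?_eq_getElem hr']
  by_cases hrr : r.toNat = r'.toNat
  · have hre : r = r' := by omega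
    have hcc : c.toNat ≠ c'.toNat := by
      have : c ≠ c' := by intro h; exact hne (by simp [h, hre])
      omega
    simp only [hrr, if_pos, Option.getD_some]
    simp [hcc]
  · simp [hrr]

lemma pvCount_set_lt {row : List Bool} {j : Nat} (hj : j < row.length)
    (hf : row[j] = false) :
    (row.set j true).count false < row.count false := by
  rw [List.set_eq_take_append_cons_drop, if_pos hj]
  conv_rhs => rw [← List.take_append_drop j row, ← List.getElem_cons_drop hj]
  simp [List.count_append, hf]

lemma pvU_set_lt {rows cols : Int} {m : List (List Bool)} {r c : Int}
    (hs : pvShape rows cols m) (hi : pvInb rows cols r c)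
    (hf : pvGetM m false r c = false) :
    pvU (pvSetM m r c true) < pvU m := by
  obtain ⟨h1, h2⟩ := hs
  obtain ⟨i0, i1, i2, i3⟩ := hi
  have hr : r.toNat < m.length := by omega
  have hc : c.toNat < m[r.toNat].length := by have := h2 r.toNat hr; omega
  have hf' : m[r.toNat][c.toNat] = false := by
    simpa [pvGetM, List.getD_eq_getElem?_getD, List.getElem?_eq_getElem hr,
      List.getElem?_eq_getElem hc] using hf
  have key := pvCount_set_lt hc hf'
  unfold pvU pvSetM
  rw [List.modify_eq_take_cons_drop hr]
  conv_rhs => rw [← List.take_append_drop r.toNat m, ← List.getElem_cons_drop hr]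
  simp only [List.map_append, List.map_cons, List.sum_append, List.sum_cons]
  omega

lemma pvU_le {rows cols : Int} {m : List (List Bool)} (hs : pvShape rows cols m) :
    pvU m ≤ rows.toNat * cols.toNat := by
  obtain ⟨h1, h2⟩ := hs
  have hb : ∀ x ∈ m.map (fun row => row.count false), x ≤ cols.toNat := by
    intro x hx
    obtain ⟨row, hrow, rfl⟩ := List.mem_map.mp hx
    obtain ⟨i, hi, rfl⟩ := List.mem_iff_getElem.mp hrow
    calc m[i].count false ≤ m[i].length := List.count_le_length
    _ ≤ cols.toNat := by have := h2 i hi; omega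
  calc pvU m ≤ (m.map (fun row => row.count false)).length • cols.toNat :=
        List.sum_le_card_nsmul _ _ hb
  _ = m.length * cols.toNat := by simp
  _ ≤ rows.toNat * cols.toNat := by
      have hm : m.length = rows.toNat := by omega
      rw [hm]

lemma pvContains_add_self {s : PySem.Set (Int × Int)} {x : Int × Int} :
    PySem.Set.contains (PySem.Set.add s x) x = true := by
  rw [PySem.Set.contains_iff, PySem.Set.mem_add]; exact Or.inr rfl

lemma pvContains_add_ne {s : PySem.Set (Int × Int)} {x y : Int × Int} (h : y ≠ x) :
    PySem.Set.contains (PySem.Set.add s x) y = PySem.Set.contains s y := by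
  apply Bool.eq_iff_iff.mpr
  rw [PySem.Set.contains_iff, PySem.Set.contains_iff, PySem.Set.mem_add]
  constructor
  · rintro (hs | he)
    · exact hs
    · exact absurd he h
  · exact Or.inl

-- THE SIMULATION: one run of A's recursive dfs equals B's stack loop consuming the top
-- of the stack, and the two keep marking the same cells in the same order.
lemma pvSim (grid : List (List Int)) (rows cols v : Int) (hv : v ≠ 0) :
    ∀ (f : Nat) (visited : List (List Bool)) (cells : List (Int × Int))
      (seen : PySem.Set (Int × Int)) (comp : List (Int × Int)) (r c : Int)
      (stack : List (Int × Int)),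
      pvShape rows cols visited → pvRel rows cols seen visited → pvU visited < f →
      ∃ (visited' : List (List Bool)) (Δ : List (Int × Int)),
        pvDfs grid rows cols v f r c (visited, cells) = (visited', cells ++ Δ) ∧
        pvBLoop grid rows cols v (seen, comp) ((r, c) :: stack)
          = pvBLoop grid rows cols v (Δ.foldl PySem.Set.add seen, comp ++ Δ) stack ∧
        pvShape rows cols visited' ∧
        pvRel rows cols (Δ.foldl PySem.Set.add seen) visited' ∧
        pvU visited' ≤ pvU visited ∧
        (∀ p ∈ Δ, pvInb rows cols p.1 p.2) := by
  intro f
  induction f with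
  | zero => intro visited cells seen comp r c stack _ _ hu; exact absurd hu (Nat.not_lt_zero _)
  | succ f ih =>
    intro visited cells seen comp r c stack hs hrel hu
    by_cases hgA : r < 0 ∨ rows ≤ r ∨ c < 0 ∨ cols ≤ c ∨ pvGetM visited false r c = true
        ∨ pvGetM grid 0 r c ≠ v ∨ pvGetM grid 0 r c = 0
    · -- guard true: both sides skip the cell
      have hgB : PySem.Set.contains seen (r, c) = true ∨ r < 0 ∨ rows ≤ r ∨ c < 0 ∨ cols ≤ c
          ∨ pvGetM grid 0 r c ≠ v := by
        by_cases hb : pvInb rows cols r c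
        · obtain ⟨b1, b2, b3, b4⟩ := hb
          rcases hgA with h | h | h | h | h | h | h
          · omega
          · omega
          · omega
          · omega
          · exact Or.inl (by rw [← hrel r c ⟨b1, b2, b3, b4⟩]; exact h)
          · exact Or.inr (Or.inr (Or.inr (Or.inr (Or.inr h))))
          · exact Or.inr (Or.inr (Or.inr (Or.inr (Or.inr (by
              rw [h]; exact fun he => hv he.symm))))) 
        · have hb' : r < 0 ∨ rows ≤ r ∨ c < 0 ∨ cols ≤ c := by unfold pvInb at hb; omega
          tauto
      refine ⟨visited, [], ?_, ?_, hs, by simpa using hrel, le_refl _, by simp⟩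
      · rw [pvDfs]
        simp [if_pos hgA]
      · rw [pvBLoop, dif_pos hgB]
        simp
    · -- guard false: the cell is visited; unfold once and chain the four neighbours
      have hcomp := hgA
      push Not at hcomp
      obtain ⟨h1, h2, h3, h4, h5, h6, _⟩ := hcomp
      have hb : pvInb rows cols r c := ⟨by omega, by omega, by omega, by omega⟩
      have hv5 : pvGetM visited false r c = false := by simpa using h5
      have hcseen : PySem.Set.contains seen (r, c) = false := by rw [← hrel r c hb]; exact hv5
      have hgB : ¬ (PySem.Set.contains seen (r, c) = true ∨ r < 0 ∨ rows ≤ r ∨ c < 0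
          ∨ cols ≤ c ∨ pvGetM grid 0 r c ≠ v) := by
        push Not
        refine ⟨?_, by omega, by omega, by omega, by omega, h6⟩
        intro hmem
        rw [hcseen] at hmem
        exact absurd hmem (by simp)
      have hs1 : pvShape rows cols (pvSetM visited r c true) := pvShape_set hs
      have hrel1 : pvRel rows cols (PySem.Set.add seen (r, c)) (pvSetM visited r c true) := by
        intro r' c' hb'
        by_cases he : ((r', c') : Int × Int) = (r, c)
        · have hee : r' = r ∧ c' = c := by
            have := Prod.mk.injEq r' c' r c ▸ he
            exact Prod.mk.inj he
          obtain ⟨rfl, rfl⟩ := hee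
          rw [pvGetM_set_self hs hb, pvContains_add_self]
        · rw [pvGetM_set_ne hs hb hb' he, pvContains_add_ne he]
          exact hrel r' c' hb'
      have hu1 : pvU (pvSetM visited r c true) < pvU visited := pvU_set_lt hs hb hv5
      obtain ⟨vis2, Δ1, e1A, e1B, hs2, hrel2, hu2, hin1⟩ :=
        ih (pvSetM visited r c true) (cells ++ [(r, c)]) (PySem.Set.add seen (r, c))
          (comp ++ [(r, c)]) r (c+1) ((r+1, c) :: (r, c-1) :: (r-1, c) :: stack)
          hs1 hrel1 (by omega)
      obtain ⟨vis3, Δ2, e2A, e2B, hs3, hrel3, hu3, hin2⟩ :=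
        ih vis2 (cells ++ [(r, c)] ++ Δ1) (Δ1.foldl PySem.Set.add (PySem.Set.add seen (r, c)))
          (comp ++ [(r, c)] ++ Δ1) (r+1) c ((r, c-1) :: (r-1, c) :: stack)
          hs2 hrel2 (by omega)
      obtain ⟨vis4, Δ3, e3A, e3B, hs4, hrel4, hu4, hin3⟩ :=
        ih vis3 (cells ++ [(r, c)] ++ Δ1 ++ Δ2)
          (Δ2.foldl PySem.Set.add (Δ1.foldl PySem.Set.add (PySem.Set.add seen (r, c))))
          (comp ++ [(r, c)] ++ Δ1 ++ Δ2) r (c-1) ((r-1, c) :: stack)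
          hs3 hrel3 (by omega)
      obtain ⟨vis5, Δ4, e4A, e4B, hs5, hrel5, hu5, hin4⟩ :=
        ih vis4 (cells ++ [(r, c)] ++ Δ1 ++ Δ2 ++ Δ3)
          (Δ3.foldl PySem.Set.add (Δ2.foldl PySem.Set.add
            (Δ1.foldl PySem.Set.add (PySem.Set.add seen (r, c)))))
          (comp ++ [(r, c)] ++ Δ1 ++ Δ2 ++ Δ3) (r-1) c stack
          hs4 hrel4 (by omega)
      refine ⟨vis5, (r, c) :: (Δ1 ++ Δ2 ++ Δ3 ++ Δ4), ?_, ?_, hs5, ?_, by omega, ?_⟩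
      · rw [pvDfs]
        simp only [if_neg hgA]
        rw [e1A, e2A, e3A, e4A]
        simp [List.append_assoc]
      · rw [pvBLoop]
        simp only [dif_neg hgB]
        rw [e1B, e2B, e3B, e4B]
        simp [List.foldl_append, List.append_assoc]
      · simpa [List.foldl_append] using hrel5
      · intro p hp
        rcases List.mem_cons.mp hp with rfl | hp'
        · exact hb
        · rcases List.mem_append.mp hp' with hp'' | h4'
          · rcases List.mem_append.mp hp'' with hp3 | h3'
            · rcases List.mem_append.mp hp3 with hp1 | h2'
              · exact hin1 p hp1
              · exact hin2 p h2'
            · exact hin3 p h3'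
          · exact hin4 p h4'

-- matrix writes and dict inserts of one component agree pointwise
lemma pvWrite {rows cols : Int} :
    ∀ (Δ : List (Int × Int)) (output : List (List Int)) (dict : PySem.Dict (Int × Int) Int) (s : Int),
      pvShape rows cols output → (∀ p ∈ Δ, pvInb rows cols p.1 p.2) →
      (∀ r c, pvInb rows cols r c → pvGetM output 0 r c = PySem.Dict.getD dict (r, c) 0) →
      pvShape rows cols (Δ.foldl (fun o p => pvSetM o p.1 p.2 s) output) ∧
      (∀ r c, pvInb rows cols r c →
        pvGetM (Δ.foldl (fun o p => pvSetM o p.1 p.2 s) output) 0 r c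
          = PySem.Dict.getD (Δ.foldl (fun d p => PySem.Dict.insert d p s) dict) (r, c) 0) := by
  intro Δ
  induction Δ with
  | nil => intro output dict s hs _ hpt; exact ⟨hs, hpt⟩
  | cons p Δ ih =>
    intro output dict s hs hΔ hpt
    have hp : pvInb rows cols p.1 p.2 := hΔ p List.mem_cons_self
    simp only [List.foldl_cons]
    apply ih _ _ _ (pvShape_set hs) (fun q hq => hΔ q (List.mem_cons_of_mem _ hq))
    intro r c hrc
    by_cases he : (r, c) = p
    · have h1 : r = p.1 ∧ c = p.2 := by rw [← he]; exact ⟨rfl, rfl⟩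
      obtain ⟨rfl, rfl⟩ := h1
      rw [pvGetM_set_self hs hrc]
      have hpe : ((p.1, p.2) : Int × Int) = p := rfl
      rw [hpe, PySem.Dict.getD_insert_self]
    · rw [pvGetM_set_ne hs hp hrc he,
        PySem.Dict.getD_insert_of_ne dict s 0 he]
      exact hpt r c hrc

-- joint invariant of the two outer loops
def pvOuterRel (rows cols : Int)
    (stA : List (List Bool) × List (List Int))
    (stB : PySem.Set (Int × Int) × PySem.Dict (Int × Int) Int) : Prop :=
  pvShape rows cols stA.1 ∧ pvShape rows cols stA.2 ∧ pvRel rows cols stB.1 stA.1 ∧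
  ∀ r c, pvInb rows cols r c → pvGetM stA.2 0 r c = PySem.Dict.getD stB.2 (r, c) 0

lemma pvStep_rel {grid : List (List Int)} {rows cols : Int} {stA stB} {rc : Int × Int}
    (hin : pvInb rows cols rc.1 rc.2) (h : pvOuterRel rows cols stA stB) :
    pvOuterRel rows cols (pvAStep grid rows cols stA rc) (pvBStep grid rows cols stB rc) := by
  obtain ⟨r, c⟩ := rc
  obtain ⟨hsV, hsO, hrel, hpt⟩ := h
  simp only [pvAStep, pvBStep]
  by_cases hc : pvGetM stA.1 false r c = false ∧ pvGetM grid 0 r c ≠ 0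
  · -- both start a fill at (r, c)
    have hcB : ¬ (pvGetM grid 0 r c = 0 ∨ PySem.Set.contains stB.1 (r, c) = true) := by
      push Not
      refine ⟨hc.2, ?_⟩
      intro hm
      rw [← hrel r c hin, hc.1] at hm
      exact absurd hm (by simp)
    rw [if_pos hc, if_neg hcB]
    have hu : pvU stA.1 < rows.toNat * cols.toNat + 1 := by
      have := pvU_le (rows := rows) (cols := cols) hsV
      omega
    obtain ⟨vis', Δ, eA, eB, hs', hrel', _, hinΔ⟩ :=
      pvSim grid rows cols (pvGetM grid 0 r c) hc.2 (rows.toNat * cols.toNat + 1)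
        stA.1 [] stB.1 [] r c [] hsV hrel hu
    rw [eB, pvBLoop] at *
    rw [eA]
    simp only [List.nil_append]
    have hw := pvWrite (rows := rows) (cols := cols) Δ stA.2 stB.2
      (min ((Δ.length : Int)) 9) hsO hinΔ hpt
    exact ⟨hs', hw.1, hrel', hw.2⟩
  · -- both skip: the cell is zero or already marked
    have hcB : pvGetM grid 0 r c = 0 ∨ PySem.Set.contains stB.1 (r, c) = true := by
      rcases Decidable.em (pvGetM grid 0 r c = 0) with h0 | h0
      · exact Or.inl h0
      · have : ¬ pvGetM stA.1 false r c = false := fun hf => hc ⟨hf, h0⟩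
        have ht : pvGetM stA.1 false r c = true := by
          cases hb : pvGetM stA.1 false r c
          · exact absurd hb this
          · rfl
        exact Or.inr (by rw [← hrel r c hin]; exact ht)
    rw [if_neg hc, if_pos hcB]
    exact ⟨hsV, hsO, hrel, hpt⟩

lemma pvFold_rel {grid : List (List Int)} {rows cols : Int} :
    ∀ (l : List (Int × Int)) stA stB, (∀ p ∈ l, pvInb rows cols p.1 p.2) →
      pvOuterRel rows cols stA stB →
      pvOuterRel rows cols (l.foldl (pvAStep grid rows cols) stA)
        (l.foldl (pvBStep grid rows cols) stB) := by
  intro l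
  induction l with
  | nil => intro stA stB _ h; exact h
  | cons p l ih =>
    intro stA stB hin h
    exact ih _ _ (fun q hq => hin q (List.mem_cons_of_mem _ hq))
      (pvStep_rel (hin p (List.mem_cons_self)) h)

lemma pvShape_rep {α : Type} (n k : Nat) (x : α) :
    pvShape (n : Int) (k : Int) (List.replicate n (List.replicate k x)) := by
  refine ⟨by simp, ?_⟩
  intro i hi
  simp at hi
  simp [List.getElem_replicate]

lemma pvGetM_rep {α : Type} (n k : Nat) (x : α) (r c : Int) :
    pvGetM (List.replicate n (List.replicate k x)) x r c = x := by
  simp [pvGetM, List.getD_eq_getElem?_getD, List.getElem?_replicate]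
  split
  · simp [List.getElem?_replicate]
    split <;> rfl
  · rfl

lemma pvOut_eq {n k : Nat} (out : List (List Int)) (D : Int × Int → Int)
    (hs : pvShape (n : Int) (k : Int) out)
    (hpt : ∀ r c, pvInb (n : Int) (k : Int) r c → pvGetM out 0 r c = D (r, c)) :
    out = (PySem.List.pyRange 0 (n : Int) 1).map (fun r =>
      (PySem.List.pyRange 0 (k : Int) 1).map (fun c => D (r, c))) := by
  rw [PySem.List.pyRange_zero_nat n, PySem.List.pyRange_zero_nat k]
  obtain ⟨h1, h2⟩ := hs
  apply List.ext_getElem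
  · simp; omega
  intro i hi hi'
  simp only [List.getElem_map, List.getElem_range]
  have hik : i < n := by simp at hi'; omega
  apply List.ext_getElem
  · have := h2 i hi; simp; omega
  intro j hj hj'
  simp only [List.getElem_map, List.getElem_range]
  have hjk : j < k := by simp at hj'; omega
  have hb : pvInb (n : Int) (k : Int) (i : Int) (j : Int) := by
    refine ⟨by positivity, by exact_mod_cast hik, by positivity, by exact_mod_cast hjk⟩
  have := hpt (i : Int) (j : Int) hb
  rw [← this]
  have hjlen : j < out[i].length := by have := h2 i hi; omega
  simp [pvGetM, List.getD_eq_getElem?_getD, List.getElem?_eq_getElem hi,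
    List.getElem?_eq_getElem hjlen]

-- ===== VERDICT (by name: the statement is the Claim_ definition above) =====
theorem mark_by_size_spec : Claim_equal_mark_by_size := by
  intro grid _ _
  unfold Spec_mark_by_size
  by_cases hemp : grid = [] ∨ grid.headD [] = []
  · unfold mark_by_size mark_by_size_alt
    rw [if_pos hemp, if_pos hemp]
  · unfold mark_by_size mark_by_size_alt
    rw [if_neg hemp, if_neg hemp]
    have h0 : pvOuterRel (grid.length : Int) ((grid.headD []).length : Int)
        (List.replicate grid.length (List.replicate (grid.headD []).length false),
         List.replicate grid.length (List.replicate (grid.headD []).length (0 : Int)))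
        (PySem.Set.empty, PySem.Dict.empty) := by
      refine ⟨pvShape_rep _ _ _, pvShape_rep _ _ _, ?_, ?_⟩
      · intro r c _
        rw [pvGetM_rep]
        symm
        simp [pysem, PySem.Set.empty]
      · intro r c _
        rw [pvGetM_rep]
        symm
        simp [pysem]
    have hF := pvFold_rel (grid := grid)
      (pvPairs (grid.length : Int) ((grid.headD []).length : Int)) _ _
      (fun p hp => pvMem_pvPairs.mp hp) h0
    obtain ⟨_, hsO, _, hpt⟩ := hF
    exact pvOut_eq (D := fun p => PySem.Dict.getD
      (List.foldl (pvBStep grid (grid.length : Int) ((grid.headD []).length : Int))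
        (PySem.Set.empty, PySem.Dict.empty)
        (pvPairs (grid.length : Int) ((grid.headD []).length : Int))).2 p 0)
      _ hsO hpt
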